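-- pv_equiv track=rewrite | github.com/matt-black/rosalind | bio_stronghold/kmp_v2.py | fail_array
-- ===== SOURCE A (Python) =====
-- def fail_array(seq):
--     fail = [] #by convention, fail[0] = 0
--     for i, char in enumerate(seq):
--         j = i
--         k = 1
--         while j>0:
--             pref = seq[0:j]
--             try:
--                 suff = seq[k:i+1]
--             except IndexError:
--                 suff = seq[1:]
--             if pref == suff:
--                 fail.append(j)
--                 break
--             else:
--                 j -= 1
--                 k += 1
--                 continue
--         else:
--             fail.append(0)
--     return fail
-- ===== SOURCE B (Python) =====
-- def fail_array(seq):
--     n = len(seq)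
--     if n == 0:
--         return []
--     fail = [0]
--     k = 0
--     for i in range(1, n):
--         while k > 0 and seq[i] != seq[k]:
--             k = fail[k - 1]
--         if seq[i] == seq[k]:
--             k += 1
--         fail.append(k)
--     return fail
-- ===== Notes on version B (the rewrite author's own statement) =====
-- stated objective: faster
-- what changed: Replaces A's per-index downward scan over all candidate border lengths with slice comparisons (cubic work) by the standard incremental KMP prefix-function computation that reuses previously computed failure values via single character comparisons.
import Mathlib
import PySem

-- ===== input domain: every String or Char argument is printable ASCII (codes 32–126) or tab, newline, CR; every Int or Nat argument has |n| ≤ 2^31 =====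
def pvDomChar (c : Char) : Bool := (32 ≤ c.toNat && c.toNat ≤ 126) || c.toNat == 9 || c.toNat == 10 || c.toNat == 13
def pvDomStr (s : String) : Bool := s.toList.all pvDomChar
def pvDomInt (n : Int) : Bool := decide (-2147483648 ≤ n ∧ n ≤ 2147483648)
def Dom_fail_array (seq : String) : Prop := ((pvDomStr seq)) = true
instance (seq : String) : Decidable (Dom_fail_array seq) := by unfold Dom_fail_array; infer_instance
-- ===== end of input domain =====

-- B replaces A's cubic per-index downward scan over slice pairs by the standard
-- linear incremental KMP prefix-function computation (an asymptotic speed-up).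

-- ===== PORT A =====
-- inner 'while j>0' loop of A: j counts down, k counts up (k = i+1-j at every call).
-- The 'try/except IndexError' around the slice is dead code: Python slicing never
-- raises IndexError, so only the 'try' body is ported.
def pvAwhile (cs : List Char) (i : Nat) : Nat → Nat → Int
  | 0, _k => 0            -- while condition fails -> for-else branch appends 0
  | j+1, k =>
    if PySem.List.slice cs (some (0:Int)) (some ((j+1 : Nat) : Int))
         = PySem.List.slice cs (some ((k : Nat) : Int)) (some ((i+1 : Nat) : Int))
    then ((j+1 : Nat) : Int)
    else pvAwhile cs i j (k+1)

-- 'for i, char in enumerate(seq)': char is never used, so the loop runs over the indices.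
def fail_array (seq : String) : List Int :=
  let cs := seq.toList
  (List.range cs.length).foldl (fun fail i => fail ++ [pvAwhile cs i i 1]) []

-- ===== PORT B =====
-- 'while k > 0 and seq[i] != seq[k]: k = fail[k-1]'.  fuel = entry value of k is
-- enough, since every stored failure value is < its index + 1 (proved below);
-- list indexing is ported as getD: Source B only indexes in range.
def pvBwhile (cs : List Char) (fail : List Nat) (c : Char) : Nat → Nat → Nat
  | 0, k => k
  | fuel+1, k =>
    if 0 < k ∧ cs.getD k ' ' ≠ c then pvBwhile cs fail c fuel (fail.getD (k-1) 0) else k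

-- one iteration of Source B's 'for i in range(1, n)' body; state = (fail, k)
def pvBstep (cs : List Char) (st : List Nat × Nat) (i : Nat) : List Nat × Nat :=
  let c := cs.getD i ' '
  let k1 := pvBwhile cs st.1 c st.2 st.2
  let k2 := if cs.getD k1 ' ' = c then k1 + 1 else k1
  (st.1 ++ [k2], k2)

def fail_array_alt (seq : String) : List Int :=
  let cs := seq.toList
  if cs.length = 0 then []
  else (((List.range' 1 (cs.length - 1)).foldl (pvBstep cs) ([0], 0)).1).map
         (fun (k : Nat) => (k : Int))

-- ===== PRECONDITION & SPEC =====
def Spec_fail_array (seq : String) (out : List Int) : Prop := out = fail_array_alt seq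
instance (seq : String) (out : List Int) : Decidable (Spec_fail_array seq out) := by unfold Spec_fail_array; infer_instance

-- ===== CLAIM (what is proved, stated in full; the proofs are below) =====
def Claim_equal_fail_array : Prop := ∀ (seq : String), Dom_fail_array seq → Spec_fail_array seq (fail_array seq)

-- ===== LEMMAS AND PROOFS =====

-- 'cs.take j is a border (prefix = suffix) of cs.take m'
def pvBrd (cs : List Char) (m j : Nat) : Prop :=
  cs.take j = (cs.take m).drop (m - j)

-- greatest j' ≤ j with pvBrd cs m j' (downward scan, as A does)
def pvMaxb (cs : List Char) (m : Nat) : Nat → Nat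
  | 0 => 0
  | j+1 => if cs.take (j+1) = (cs.take m).drop (m - (j+1)) then j+1 else pvMaxb cs m j

-- the prefix-function value at index i
def pvM (cs : List Char) (i : Nat) : Nat := pvMaxb cs (i+1) i

theorem pvBrd_zero (cs : List Char) (m : Nat) : pvBrd cs m 0 := by
  unfold pvBrd
  simp [List.drop_eq_nil_of_le]

theorem pvMaxb_le (cs : List Char) (m j : Nat) : pvMaxb cs m j ≤ j := by
  induction j with
  | zero => simp [pvMaxb]
  | succ j ih => unfold pvMaxb; split <;> omega

theorem pvMaxb_brd (cs : List Char) (m j : Nat) : pvBrd cs m (pvMaxb cs m j) := by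
  induction j with
  | zero => simpa [pvMaxb] using pvBrd_zero cs m
  | succ j ih =>
    unfold pvMaxb
    split
    · exact ‹_›
    · exact ih

theorem pvMaxb_max (cs : List Char) (m j j' : Nat)
    (hb : pvBrd cs m j') (hle : j' ≤ j) : j' ≤ pvMaxb cs m j := by
  induction j with
  | zero => omega
  | succ j ih =>
    unfold pvMaxb
    split
    · omega
    · rename_i hne
      rcases Nat.lt_or_ge j' (j+1) with h | h
      · exact ih (by omega)
      · exfalso
        apply hne
        have hj : j' = j + 1 := by omega
        have hb' : pvBrd cs m (j+1) := hj ▸ hb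
        exact hb'

-- a border of a border is a border, and conversely below a border
theorem pvBrd_trans (cs : List Char) (m j j' : Nat)
    (hjm : j ≤ m) (hj' : j' ≤ j) (h : pvBrd cs m j) :
    pvBrd cs m j' ↔ pvBrd cs j j' := by
  unfold pvBrd at *
  have h1 : m - j' = (m - j) + (j - j') := by omega
  rw [h1, ← List.drop_drop, ← h]

-- extending a border by one matching character
theorem pvBrd_succ (cs : List Char) (m j : Nat)
    (hm : m < cs.length) (hj : j < m) :
    pvBrd cs (m+1) (j+1) ↔ pvBrd cs m j ∧ cs.getD j ' ' = cs.getD m ' ' := by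
  unfold pvBrd
  have hjl : j < cs.length := by omega
  have ht1 : cs.take (j+1) = cs.take j ++ [cs.getD j ' '] := by
    rw [List.take_add_one]
    simp [List.getD_eq_getElem?_getD, List.getElem?_eq_getElem hjl]
  have ht2 : cs.take (m+1) = cs.take m ++ [cs.getD m ' '] := by
    rw [List.take_add_one]
    simp [List.getD_eq_getElem?_getD, List.getElem?_eq_getElem hm]
  have hd : (m+1) - (j+1) = m - j := by omega
  have hlen : m - j ≤ (cs.take m).length := by
    simp [List.length_take]; omega
  rw [ht1, ht2, hd, List.drop_append_of_le_length hlen]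
  constructor
  · intro h
    have := List.append_inj h (by simp [List.length_take]; omega)
    exact ⟨this.1, by simpa using this.2⟩
  · rintro ⟨h1, h2⟩
    rw [h1, h2]

-- ===== A-side characterization =====

theorem pvAwhile_eq (cs : List Char) (i : Nat) :
    ∀ j k, j + k = i + 1 → pvAwhile cs i j k = ((pvMaxb cs (i+1) j : Nat) : Int) := by
  intro j
  induction j with
  | zero => intro k _; simp [pvAwhile, pvMaxb]
  | succ j ih =>
    intro k hk
    unfold pvAwhile pvMaxb
    have e1 : (i+1) - k = j+1 := by omega
    have e2 : (i+1) - (j+1) = k := by omega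
    have hpref : PySem.List.slice cs (some (0:Int)) (some ((j+1 : Nat) : Int))
        = cs.take (j+1) := by
      rw [PySem.List.slice_zero_start, PySem.List.slice_to_natCast]
    have hsuff : PySem.List.slice cs (some ((k : Nat) : Int)) (some ((i+1 : Nat) : Int))
        = (cs.take (i+1)).drop ((i+1) - (j+1)) := by
      rw [PySem.List.slice_natCast, e1, e2, List.drop_take, e1]
    rw [hpref, hsuff, e2]
    by_cases hc : cs.take (j+1) = (cs.take (i+1)).drop k
    · simp [hc]
    · simp only [if_neg hc]
      exact ih (k+1) (by omega)

theorem fail_array_eq (seq : String) :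
    fail_array seq
      = (List.range seq.toList.length).map (fun i => ((pvM seq.toList i : Nat) : Int)) := by
  unfold fail_array
  rw [PySem.List.foldl_append_singleton_eq_map]
  simp only [List.nil_append]
  exact List.map_congr_left (fun i _ => pvAwhile_eq seq.toList i i 1 (by omega))

-- ===== B-side: the while loop walks the border chain =====

theorem pvBwhile_spec (cs : List Char) (t : Nat) (ht0 : 0 < t) (ht : t < cs.length) :
    ∀ fuel k, k ≤ fuel → k < t → pvBrd cs t k →
      (∀ j, k < j → j < t → pvBrd cs t j → cs.getD j ' ' ≠ cs.getD t ' ') →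
      (pvBwhile cs ((List.range t).map (pvM cs)) (cs.getD t ' ') fuel k < t ∧
       pvBrd cs t (pvBwhile cs ((List.range t).map (pvM cs)) (cs.getD t ' ') fuel k) ∧
       (∀ j, pvBwhile cs ((List.range t).map (pvM cs)) (cs.getD t ' ') fuel k < j →
          j < t → pvBrd cs t j → cs.getD j ' ' ≠ cs.getD t ' ') ∧
       (pvBwhile cs ((List.range t).map (pvM cs)) (cs.getD t ' ') fuel k = 0 ∨
        cs.getD (pvBwhile cs ((List.range t).map (pvM cs)) (cs.getD t ' ') fuel k) ' '
          = cs.getD t ' ')) := by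
  intro fuel
  induction fuel with
  | zero =>
    intro k hk hkt hbrd hmax
    have : k = 0 := by omega
    subst this
    exact ⟨ht0, pvBrd_zero cs t, hmax, Or.inl rfl⟩
  | succ fuel ih =>
    intro k hk hkt hbrd hmax
    unfold pvBwhile
    split
    · rename_i hcond
      obtain ⟨hk0, hne⟩ := hcond
      have hk1t : k - 1 < t := by omega
      have hget : (((List.range t).map (pvM cs)).getD (k-1) 0) = pvM cs (k-1) := by
        rw [List.getD_eq_getElem?_getD]
        simp [List.getElem?_eq_getElem (by simpa using hk1t :
          k - 1 < ((List.range t).map (pvM cs)).length)]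
      rw [hget]
      have hkeq : (k-1)+1 = k := by omega
      have hMle : pvM cs (k-1) ≤ k - 1 := by
        unfold pvM; rw [hkeq]; exact pvMaxb_le cs k (k-1)
      have hMbrd : pvBrd cs k (pvM cs (k-1)) := by
        unfold pvM; rw [hkeq]; exact pvMaxb_brd cs k (k-1)
      refine ih (pvM cs (k-1)) (by omega) (by omega) ?_ ?_
      · exact (pvBrd_trans cs t k (pvM cs (k-1)) (by omega) (by omega) hbrd).mpr hMbrd
      · intro j hj hjt hbj
        rcases Nat.lt_or_ge k j with h | h
        · exact hmax j h hjt hbj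
        · rcases Nat.eq_or_lt_of_le h with h' | h'
          · subst h'; exact hne
          · -- pvM cs (k-1) < j < k : contradicts maximality of pvM cs (k-1)
            exfalso
            have hbj' : pvBrd cs k j :=
              (pvBrd_trans cs t k j (by omega) (by omega) hbrd).mp hbj
            have : j ≤ pvM cs (k-1) := by
              unfold pvM; rw [hkeq]; exact pvMaxb_max cs k (k-1) j hbj' (by omega)
            omega
    · rename_i hcond
      push_neg at hcond
      refine ⟨hkt, hbrd, hmax, ?_⟩
      rcases Nat.eq_zero_or_pos k with h | h
      · exact Or.inl h
      · exact Or.inr (hcond h)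

theorem pvBstep_M (cs : List Char) (t : Nat) (ht0 : 0 < t) (ht : t < cs.length) :
    pvBstep cs ((List.range t).map (pvM cs), pvM cs (t-1)) t
      = ((List.range (t+1)).map (pvM cs), pvM cs t) := by
  have ht1 : (t-1)+1 = t := by omega
  have hk0le : pvM cs (t-1) ≤ t - 1 := by
    unfold pvM; rw [ht1]; exact pvMaxb_le cs t (t-1)
  have hk0brd : pvBrd cs t (pvM cs (t-1)) := by
    unfold pvM; rw [ht1]; exact pvMaxb_brd cs t (t-1)
  have hk0max : ∀ j, pvM cs (t-1) < j → j < t → pvBrd cs t j →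
      cs.getD j ' ' ≠ cs.getD t ' ' := by
    intro j hj hjt hbj _
    have : j ≤ pvM cs (t-1) := by
      unfold pvM; rw [ht1]; exact pvMaxb_max cs t (t-1) j hbj (by omega)
    omega
  obtain ⟨h1t, h1brd, h1max, h1stop⟩ :=
    pvBwhile_spec cs t ht0 ht (pvM cs (t-1)) (pvM cs (t-1)) le_rfl (by omega) hk0brd hk0max
  set k1 := pvBwhile cs ((List.range t).map (pvM cs)) (cs.getD t ' ')
      (pvM cs (t-1)) (pvM cs (t-1)) with hk1
  unfold pvBstep
  simp only
  rw [← hk1]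
  have hMt : (if cs.getD k1 ' ' = cs.getD t ' ' then k1 + 1 else k1) = pvM cs t := by
    split
    · rename_i heq
      -- border k1 extends by the matching character
      have hb : pvBrd cs (t+1) (k1+1) :=
        (pvBrd_succ cs t k1 ht h1t).mpr ⟨h1brd, heq⟩
      have hle : k1 + 1 ≤ pvM cs t := pvMaxb_max cs (t+1) t (k1+1) hb (by omega)
      have hge : pvM cs t ≤ k1 + 1 := by
        by_contra hlt
        push_neg at hlt
        have hMle : pvM cs t ≤ t := pvMaxb_le cs (t+1) t
        have hpos : 0 < pvM cs t := by omega
        have hb' : pvBrd cs (t+1) ((pvM cs t - 1) + 1) := by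
          have h2 : (pvM cs t - 1) + 1 = pvM cs t := by omega
          rw [h2]; exact pvMaxb_brd cs (t+1) t
        have := (pvBrd_succ cs t (pvM cs t - 1) ht (by omega)).mp hb'
        exact h1max (pvM cs t - 1) (by omega) (by omega) this.1 this.2
      omega
    · rename_i hne
      have hk10 : k1 = 0 := by
        rcases h1stop with h | h
        · exact h
        · exact absurd h hne
      rw [hk10] at hne ⊢
      by_contra hM
      have hMle : pvM cs t ≤ t := pvMaxb_le cs (t+1) t
      have hpos : 0 < pvM cs t := by omega
      have hb' : pvBrd cs (t+1) ((pvM cs t - 1) + 1) := by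
        have h2 : (pvM cs t - 1) + 1 = pvM cs t := by omega
        rw [h2]; exact pvMaxb_brd cs (t+1) t
      have hh := (pvBrd_succ cs t (pvM cs t - 1) ht (by omega)).mp hb'
      rcases Nat.eq_zero_or_pos (pvM cs t - 1) with h0 | h0
      · rw [h0] at hh; exact hne hh.2
      · exact h1max (pvM cs t - 1) (by omega) (by omega) hh.1 hh.2
  rw [hMt, List.range_succ, List.map_append]
  simp

theorem pvBfold (cs : List Char) :
    ∀ r, r + 1 ≤ cs.length →
      (List.range' 1 r).foldl (pvBstep cs) ([0], 0)
        = ((List.range (r+1)).map (pvM cs), pvM cs r) := by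
  intro r
  induction r with
  | zero =>
    intro _
    simp [pvM, pvMaxb, List.range_succ]
  | succ r ih =>
    intro h
    rw [List.range'_1_concat, List.foldl_append, ih (by omega)]
    simp only [List.foldl_cons, List.foldl_nil, Nat.add_comm 1 r]
    have := pvBstep_M cs (r+1) (by omega) (by omega)
    simpa using this

-- ===== VERDICT (by name: the statement is the Claim_ definition above) =====
theorem fail_array_spec : Claim_equal_fail_array := by
  intro seq _
  unfold Spec_fail_array
  rw [fail_array_eq]
  unfold fail_array_alt
  simp only
  by_cases h : seq.toList.length = 0
  · rw [if_pos h, h]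
    simp
  · rw [if_neg h]
    have hn : (seq.toList.length - 1) + 1 = seq.toList.length := by omega
    rw [pvBfold seq.toList (seq.toList.length - 1) (by omega), hn]
    show List.map (fun i => ((pvM seq.toList i : Nat) : Int)) (List.range seq.toList.length)
       = List.map (fun k => ((k : Nat) : Int)) (List.map (pvM seq.toList) (List.range seq.toList.length))
    rw [List.map_map]
    exact List.map_congr_left (fun i _ => rfl)
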